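-- pv_equiv track=rewrite | github.com/xiedidan/data-restore-py | oracle_to_postgres/common/optimized_streaming_importer.py | _is_valid_insert_statement
-- ===== SOURCE A (Python) =====
-- def _is_valid_insert_statement(statement: str) -> bool:
--     """Check if statement is a valid INSERT statement."""
--     statement_lower = statement.lower().strip()
--
--     if not statement_lower:
--         return False
--
--     # Skip Oracle-specific commands
--     oracle_commands = [
--         'prompt ', 'set feedback', 'set define', 'set echo',
--         'set pagesize', 'set linesize', 'set timing', 'set serveroutput',
--         'set verify', 'set heading', 'spool ', 'exit', 'quit',
--         'connect ', 'disconnect', 'commit;', 'rollback;',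
--         'alter session', 'whenever sqlerror', 'whenever oserror'
--     ]
--
--     for oracle_cmd in oracle_commands:
--         if statement_lower.startswith(oracle_cmd):
--             return False
--
--     # Skip comments
--     if (statement_lower.startswith('--') or
--         statement_lower.startswith('/*') or
--         statement_lower.startswith('rem ')):
--         return False
--
--     # Only allow INSERT statements
--     return statement_lower.startswith('insert')
-- ===== SOURCE B (Python) =====
-- def _is_valid_insert_statement(statement: str) -> bool:
--     """Check if statement is a valid INSERT statement."""
--     # Every reject branch in the original can only match strings that do not
--     # start with 'insert', so the whole body collapses to one predicate.
--     return statement.lower().strip().startswith('insert')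
-- ===== Notes on version B (the rewrite author's own statement) =====
-- stated objective: simpler
-- what changed: Replaced the empty-check, the 19-element oracle-command prefix loop and the comment-prefix chain (all of which can only fire on strings that do not start with 'insert' and thus return the same False as the final check) with the single expression statement.lower().strip().startswith('insert').
import Mathlib
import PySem

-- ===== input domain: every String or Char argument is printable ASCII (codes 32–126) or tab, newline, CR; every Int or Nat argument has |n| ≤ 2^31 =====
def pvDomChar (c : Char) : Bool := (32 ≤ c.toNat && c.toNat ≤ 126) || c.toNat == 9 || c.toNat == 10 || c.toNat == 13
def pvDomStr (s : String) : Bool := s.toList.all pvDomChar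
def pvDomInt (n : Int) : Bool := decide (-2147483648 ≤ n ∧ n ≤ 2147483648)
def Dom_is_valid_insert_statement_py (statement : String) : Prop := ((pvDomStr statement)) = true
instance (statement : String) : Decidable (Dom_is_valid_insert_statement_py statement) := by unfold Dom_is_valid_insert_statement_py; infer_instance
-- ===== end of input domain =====

-- B collapses A's dead reject branches (empty check, oracle-command loop, comment prefixes —
-- none can match a string that starts with 'insert') into a single startswith test; objective: simpler.

-- ===== PORT A =====
def pvOracleCommands : List String :=
  ["prompt ", "set feedback", "set define", "set echo",
   "set pagesize", "set linesize", "set timing", "set serveroutput",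
   "set verify", "set heading", "spool ", "exit", "quit",
   "connect ", "disconnect", "commit;", "rollback;",
   "alter session", "whenever sqlerror", "whenever oserror"]

def is_valid_insert_statement_py (statement : String) : Bool :=
  let statement_lower := PySem.Str.strip (PySem.Str.lower statement)
  if statement_lower = "" then false
  else if pvOracleCommands.any (fun cmd => PySem.Str.startswith statement_lower cmd) then false
  else if PySem.Str.startswith statement_lower "--" ||
          PySem.Str.startswith statement_lower "/*" ||
          PySem.Str.startswith statement_lower "rem " then false
  else PySem.Str.startswith statement_lower "insert"

-- ===== PORT B =====
def is_valid_insert_statement_py_alt (statement : String) : Bool :=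
  PySem.Str.startswith (PySem.Str.strip (PySem.Str.lower statement)) "insert"

-- ===== PRECONDITION & SPEC =====
def Spec_is_valid_insert_statement_py (statement : String) (out : Bool) : Prop := out = is_valid_insert_statement_py_alt statement
instance (statement : String) (out : Bool) : Decidable (Spec_is_valid_insert_statement_py statement out) := by unfold Spec_is_valid_insert_statement_py; infer_instance

-- ===== CLAIM (what is proved, stated in full; the proofs are below) =====
def Claim_equal_is_valid_insert_statement_py : Prop := ∀ (statement : String), Dom_is_valid_insert_statement_py statement → Spec_is_valid_insert_statement_py statement (is_valid_insert_statement_py statement)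

-- ===== LEMMAS AND PROOFS =====

-- two nonempty prefixes of the same list share their first character
theorem pv_prefix_head {a b : Char} {xs ys l : List Char}
    (h1 : a :: xs <+: l) (h2 : b :: ys <+: l) : a = b := by
  obtain ⟨t1, e1⟩ := h1
  obtain ⟨t2, e2⟩ := h2
  cases l with
  | nil => simp at e1
  | cons c cs =>
    have ha : a = c := by injection e1
    have hb : b = c := by injection e2
    rw [ha, hb]

-- if s starts with "insert", it cannot start with any word whose first char is not 'i'
theorem pv_sw_false {s : List Char} {c : Char} {cs : List Char}
    (h : ['i','n','s','e','r','t'] <+: s) (hc : c ≠ 'i') :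
    PySem.Chars.startswith s (c :: cs) = false := by
  rw [Bool.eq_false_iff]
  intro hw
  rw [PySem.Chars.startswith_iff] at hw
  exact hc (pv_prefix_head hw h)

-- string-literal wrapper: a word whose first character is not 'i' cannot be a prefix
theorem pv_sw_false_str {s : List Char} (h : ['i','n','s','e','r','t'] <+: s)
    (p : String) (hp : p.toList.head?.getD 'i' ≠ 'i') :
    PySem.Chars.startswith s p.toList = false := by
  cases hl : p.toList with
  | nil => rw [hl] at hp; simp at hp
  | cons c cs =>
    rw [hl] at hp
    simp only [List.head?_cons, Option.getD_some] at hp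
    exact pv_sw_false h hp

theorem is_valid_insert_statement_py_spec : Claim_equal_is_valid_insert_statement_py := by
  intro statement _
  unfold Spec_is_valid_insert_statement_py is_valid_insert_statement_py is_valid_insert_statement_py_alt
  set s := PySem.Str.strip (PySem.Str.lower statement) with hs
  dsimp only
  by_cases hb : PySem.Str.startswith s "insert" = true
  · -- s starts with "insert": every reject branch condition is false
    have hpre : ['i','n','s','e','r','t'] <+: s.toList := by
      rw [PySem.Str.startswith_eq, PySem.Chars.startswith_iff] at hb
      exact hb
    have hne : s ≠ "" := by
      intro h0
      rw [h0] at hpre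
      simp [String.toList] at hpre
    have horacle : pvOracleCommands.any (fun cmd => PySem.Str.startswith s cmd) = false := by
      simp only [pvOracleCommands, List.any_cons, List.any_nil, Bool.or_eq_false_iff,
        PySem.Str.startswith_eq]
      refine ⟨?_, ?_, ?_, ?_, ?_, ?_, ?_, ?_, ?_, ?_, ?_, ?_, ?_, ?_, ?_, ?_, ?_, ?_, ?_, ?_⟩ <;>
        [exact pv_sw_false_str hpre "prompt " (by decide);
         exact pv_sw_false_str hpre "set feedback" (by decide);
         exact pv_sw_false_str hpre "set define" (by decide);
         exact pv_sw_false_str hpre "set echo" (by decide);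
         exact pv_sw_false_str hpre "set pagesize" (by decide);
         exact pv_sw_false_str hpre "set linesize" (by decide);
         exact pv_sw_false_str hpre "set timing" (by decide);
         exact pv_sw_false_str hpre "set serveroutput" (by decide);
         exact pv_sw_false_str hpre "set verify" (by decide);
         exact pv_sw_false_str hpre "set heading" (by decide);
         exact pv_sw_false_str hpre "spool " (by decide);
         exact pv_sw_false_str hpre "exit" (by decide);
         exact pv_sw_false_str hpre "quit" (by decide);
         exact pv_sw_false_str hpre "connect " (by decide);
         exact pv_sw_false_str hpre "disconnect" (by decide);
         exact pv_sw_false_str hpre "commit;" (by decide);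
         exact pv_sw_false_str hpre "rollback;" (by decide);
         exact pv_sw_false_str hpre "alter session" (by decide);
         exact pv_sw_false_str hpre "whenever sqlerror" (by decide);
         exact ⟨pv_sw_false_str hpre "whenever oserror" (by decide), trivial⟩]
    have hc1 : PySem.Str.startswith s "--" = false := by
      rw [PySem.Str.startswith_eq]; exact pv_sw_false_str hpre "--" (by decide)
    have hc2 : PySem.Str.startswith s "/*" = false := by
      rw [PySem.Str.startswith_eq]; exact pv_sw_false_str hpre "/*" (by decide)
    have hc3 : PySem.Str.startswith s "rem " = false := by
      rw [PySem.Str.startswith_eq]; exact pv_sw_false_str hpre "rem " (by decide)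
    rw [if_neg hne, horacle, hc1, hc2, hc3]
    simp
  · -- s does not start with "insert": both sides are false
    rw [Bool.not_eq_true] at hb
    rw [hb]
    split_ifs <;> rfl

-- ===== VERDICT (by name: the statement is the Claim_ definition above) =====
-- (the theorem above is the verdict, stated by name per the required layout)
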